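-- pv_equiv track=rewrite | github.com/durkode/aoc2023 | day14p1/main.py | shift_north
-- ===== SOURCE A (Python) =====
-- def transpose(grid):
--     return list(map(list, zip(*grid)))
--
-- def shift_north(grid):
--     shifted_transposed = []
--     for x, row in enumerate(transpose(grid)):
--         new_row = []
--         circle_count = 0
--         blank_count = 0
--         for c in row:
--             if c == ".":
--                 blank_count += 1
--             elif c == "O":
--                 circle_count += 1
--             elif c == "#":
--                 while circle_count > 0:
--                     new_row.append('O')
--                     circle_count -= 1
--                 while blank_count > 0:
--                     new_row.append('.')
--                     blank_count -= 1
--                 new_row.append("#")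
--             else:
--                 raise ValueError("Invalid tile")
--         while circle_count > 0:
--             new_row.append('O')
--             circle_count -= 1
--         while blank_count > 0:
--             new_row.append('.')
--             blank_count -= 1
--         shifted_transposed.append(new_row)
--     return transpose(shifted_transposed)
-- ===== SOURCE B (Python) =====
-- def transpose(grid):
--     return list(map(list, zip(*grid)))
--
--
-- def split_on_hash(row):
--     segs = [[]]
--     for c in row:
--         if c == "#":
--             segs.append([])
--         else:
--             segs[-1].append(c)
--     return segs
--
--
-- def shift_north(grid):
--     shifted = []
--     for row in transpose(grid):
--         if any(c not in (".", "O", "#") for c in row):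
--             raise ValueError("Invalid tile")
--         sorted_segments = [sorted(seg, reverse=True) for seg in split_on_hash(row)]
--         new_row = sorted_segments[0]
--         for seg in sorted_segments[1:]:
--             new_row = new_row + ["#"] + seg
--         shifted.append(new_row)
--     return transpose(shifted)
-- ===== Notes on version B (the rewrite author's own statement) =====
-- stated objective: alternative
-- what changed: Per transposed row, B validates tiles up front, splits the row into '#'-delimited segments and reverse-sorts each segment (so 'O' precedes '.'), rejoining with '#', instead of A's single sweep with rock/blank counters and run emission.
import Mathlib
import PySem

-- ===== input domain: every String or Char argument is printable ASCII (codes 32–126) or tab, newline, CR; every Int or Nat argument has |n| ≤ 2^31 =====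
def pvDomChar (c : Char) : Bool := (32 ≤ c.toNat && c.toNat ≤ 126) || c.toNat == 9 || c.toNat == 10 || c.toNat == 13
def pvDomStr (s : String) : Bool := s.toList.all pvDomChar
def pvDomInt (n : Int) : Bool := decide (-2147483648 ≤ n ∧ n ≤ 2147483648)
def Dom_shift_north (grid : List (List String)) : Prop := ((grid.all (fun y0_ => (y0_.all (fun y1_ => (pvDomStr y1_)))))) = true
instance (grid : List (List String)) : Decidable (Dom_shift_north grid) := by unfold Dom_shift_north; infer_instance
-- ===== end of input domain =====

-- B replaces A's counter sweep by split-on-'#' + reverse-sort per segment; alternative algorithm, same cost.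

-- ===== PORT A =====
-- transpose(grid) = list(map(list, zip(*grid))): columns while every row still has an element
def pyTranspose : List (List String) → List (List String)
  | [] => []
  | r :: rs =>
    if h : ((r :: rs).all (fun row => !row.isEmpty)) = true then
      ((r :: rs).map (fun row => row.headD "")) :: pyTranspose ((r :: rs).map List.tail)
    else []
  termination_by g => (g.headD []).length
  decreasing_by
    simp only [List.all_cons, Bool.and_eq_true, Bool.not_eq_eq_eq_not, Bool.not_true,
      List.isEmpty_eq_false_iff] at h
    simp only [List.map_cons, List.headD_cons]
    cases r with
    | nil => exact absurd rfl h.1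
    | cons x xs => simp

-- A's inner loop: state (new_row, circle_count, blank_count); the invalid-tile branch
-- ('raise ValueError', excluded by Pre_) leaves the state unchanged here.
def pvShiftRow (row : List String) : List String :=
  let st := row.foldl (fun (st : List String × Nat × Nat) c =>
      if c = "." then (st.1, st.2.1, st.2.2 + 1)
      else if c = "O" then (st.1, st.2.1 + 1, st.2.2)
      else if c = "#" then
        (st.1 ++ List.replicate st.2.1 "O" ++ List.replicate st.2.2 "." ++ ["#"], 0, 0)
      else st) ([], 0, 0)
  st.1 ++ List.replicate st.2.1 "O" ++ List.replicate st.2.2 "."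

def shift_north (grid : List (List String)) : List (List String) :=
  pyTranspose ((pyTranspose grid).foldl (fun acc row => acc ++ [pvShiftRow row]) [])

-- ===== PORT B =====
-- split_on_hash: segs = [[]]; '#' appends a fresh segment, otherwise append c to the last one
def pvSplitOnHash (row : List String) : List (List String) :=
  row.foldl (fun segs c =>
      if c = "#" then segs ++ [[]]
      else segs.dropLast ++ [segs.getLastD [] ++ [c]]) [[]]

-- B's row: validate (raise is outside Pre_), split on '#', reverse-sort each segment, rejoin with '#'
def pvShiftRowAlt (row : List String) : List String :=
  let ssegs := (pvSplitOnHash row).map (fun s => PySem.List.sorted s (fun x => x) true)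
  (ssegs.tail).foldl (fun nr seg => nr ++ ["#"] ++ seg) (ssegs.headD [])

def shift_north_alt (grid : List (List String)) : List (List String) :=
  pyTranspose ((pyTranspose grid).map pvShiftRowAlt)

-- ===== PRECONDITION & SPEC =====
def pvMinLen : List (List String) → Nat
  | [] => 0
  | [r] => r.length
  | r :: rs => min r.length (pvMinLen rs)

-- Pre_: every cell the zip-truncated transpose actually visits is a valid tile; on the rest A raises ValueError.
def Pre_shift_north (grid : List (List String)) : Prop :=
  ∀ r ∈ grid, ∀ c ∈ r.take (pvMinLen grid), c = "." ∨ c = "O" ∨ c = "#"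
instance (grid : List (List String)) : Decidable (Pre_shift_north grid) := by
  unfold Pre_shift_north; infer_instance

def pvWitness_shift_north : List (List String) := [[".", "O"], ["O", "."], ["#", "O"]]

def Spec_shift_north (grid : List (List String)) (out : List (List String)) : Prop := out = shift_north_alt grid
instance (grid : List (List String)) (out : List (List String)) : Decidable (Spec_shift_north grid out) := by unfold Spec_shift_north; infer_instance

-- ===== CLAIM (what is proved, stated in full; the proofs are below) =====
def Claim_equal_shift_north : Prop := ∀ (grid : List (List String)), Dom_shift_north grid → Pre_shift_north grid → Spec_shift_north grid (shift_north grid)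

-- ===== LEMMAS AND PROOFS =====

def pvIsTile (c : String) : Prop := c = "." ∨ c = "O" ∨ c = "#"
def pvIsOD (c : String) : Prop := c = "O" ∨ c = "."

def repOD (cc bc : Nat) : List String := List.replicate cc "O" ++ List.replicate bc "."

-- common spec of one column shift
def fSpec : List String → Nat → Nat → List String
  | [], cc, bc => repOD cc bc
  | c :: r, cc, bc =>
    if c = "." then fSpec r cc (bc + 1)
    else if c = "O" then fSpec r (cc + 1) bc
    else if c = "#" then repOD cc bc ++ "#" :: fSpec r 0 0
    else fSpec r cc bc

-- right-recursive form of split_on_hash with an accumulated open segment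
def splitAcc (l : List String) : List String → List (List String)
  | [] => [l]
  | c :: r => if c = "#" then l :: splitAcc [] r else splitAcc (l ++ [c]) r

-- ---- A's fold computes fSpec ----
def finishA (st : List String × Nat × Nat) : List String := st.1 ++ repOD st.2.1 st.2.2

lemma foldA_eq (row : List String) : ∀ (acc : List String) (cc bc : Nat),
    finishA (row.foldl (fun (st : List String × Nat × Nat) c =>
        if c = "." then (st.1, st.2.1, st.2.2 + 1)
        else if c = "O" then (st.1, st.2.1 + 1, st.2.2)
        else if c = "#" then
          (st.1 ++ List.replicate st.2.1 "O" ++ List.replicate st.2.2 "." ++ ["#"], 0, 0)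
        else st) (acc, cc, bc))
    = acc ++ fSpec row cc bc := by
  induction row with
  | nil => intro acc cc bc; simp [fSpec, finishA, repOD]
  | cons c r ih =>
    intro acc cc bc
    by_cases h1 : c = "."
    · subst h1
      simp only [List.foldl_cons, if_pos rfl]
      rw [ih]
      simp [fSpec]
    · by_cases h2 : c = "O"
      · subst h2
        simp only [List.foldl_cons, if_neg (by decide : ¬("O" : String) = "."), if_pos rfl]
        rw [ih]
        simp [fSpec]
      · by_cases h3 : c = "#"
        · subst h3
          simp only [List.foldl_cons, if_neg (by decide : ¬("#" : String) = "."),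
            if_neg (by decide : ¬("#" : String) = "O"), if_pos rfl]
          rw [ih]
          simp [fSpec, repOD, List.append_assoc]
        · simp only [List.foldl_cons, if_neg h1, if_neg h2, if_neg h3]
          rw [ih]
          simp [fSpec, h1, h2, h3]

lemma pvShiftRow_eq_fSpec (row : List String) : pvShiftRow row = fSpec row 0 0 := by
  have := foldA_eq row [] 0 0
  simpa [pvShiftRow, finishA] using this

-- ---- B's fold is splitAcc ----
lemma foldB_eq (row : List String) : ∀ (ss : List (List String)) (l : List String),
    (row.foldl (fun segs c =>
        if c = "#" then segs ++ [[]]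
        else segs.dropLast ++ [segs.getLastD [] ++ [c]]) (ss ++ [l]))
    = ss ++ splitAcc l row := by
  induction row with
  | nil => intro ss l; simp [splitAcc]
  | cons c r ih =>
    intro ss l
    by_cases h : c = "#"
    · subst h
      simp only [List.foldl_cons, if_pos rfl]
      rw [if_pos trivial, ih (ss ++ [l]) []]
      simp [splitAcc, List.append_assoc]
    · simp only [List.foldl_cons, if_neg h]
      rw [List.dropLast_concat, List.getLastD_concat, ih ss (l ++ [c])]
      simp [splitAcc, h]

lemma pvSplitOnHash_eq (row : List String) : pvSplitOnHash row = splitAcc [] row := by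
  have := foldB_eq row [] []
  simpa [pvSplitOnHash] using this

lemma splitAcc_ne_nil (l : List String) (row : List String) : splitAcc l row ≠ [] := by
  induction row generalizing l with
  | nil => simp [splitAcc]
  | cons c r ih =>
    by_cases h : c = "#" <;> simp [splitAcc, h, ih]

-- ---- shape of a reverse-sorted O/. list ----
lemma shapeOD (l : List String) (hv : ∀ c ∈ l, pvIsOD c)
    (hp : l.Pairwise (fun a b : String => b ≤ a)) :
    l = repOD (l.count "O") (l.count ".") := by
  induction l with
  | nil => simp [repOD]
  | cons c t ih =>
    have hpt : t.Pairwise (fun a b : String => b ≤ a) := (List.pairwise_cons.mp hp).2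
    have hle : ∀ y ∈ t, y ≤ c := (List.pairwise_cons.mp hp).1
    have hvt : ∀ x ∈ t, pvIsOD x := fun x hx => hv x (List.mem_cons_of_mem _ hx)
    rcases hv c List.mem_cons_self with rfl | rfl
    · have h1 : ("O" :: t).count "O" = t.count "O" + 1 := by simp [List.count_cons]
      have h2 : ("O" :: t).count "." = t.count "." := by simp [List.count_cons]
      have ht := ih hvt hpt
      rw [repOD] at ht
      rw [h1, h2, repOD, List.replicate_succ, List.cons_append]
      exact congrArg _ ht
    · have hO : "O" ∉ t := by
        intro hmem
        have h1 : ("O" : String) ≤ "." := hle _ hmem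
        exact absurd h1 (by rw [String.le_iff_toList_le]; decide)
      have hcount : t.count "O" = 0 := List.count_eq_zero.mpr (by simpa using hO)
      have h1 : ("." :: t).count "O" = 0 := by simp [List.count_cons, hcount]
      have h2 : ("." :: t).count "." = t.count "." + 1 := by simp [List.count_cons]
      have ht : t = List.replicate (t.count ".") "." := by
        have := ih hvt hpt
        simpa [repOD, hcount] using this
      rw [h1, h2, repOD, List.replicate_succ]
      simp only [List.replicate, List.nil_append]
      exact congrArg _ ht

lemma sortedOD (l : List String) (hv : ∀ c ∈ l, pvIsOD c) :
    PySem.List.sorted l (fun x => x) true = repOD (l.count "O") (l.count ".") := by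
  have hperm := PySem.List.sorted_perm l (fun x : String => x) true
  have hcO := hperm.count_eq "O"
  have hcD := hperm.count_eq "."
  have hv' : ∀ c ∈ PySem.List.sorted l (fun x => x) true, pvIsOD c := by
    intro c hc
    exact hv c ((PySem.List.mem_sorted _ _ _ _).mp hc)
  have hp := PySem.List.sorted_pairwise_rev l (fun x : String => x)
  have := shapeOD _ hv' hp
  rw [this, hcO, hcD]

-- ---- the central identity ----
lemma mainOD (row : List String) : ∀ (l : List String),
    (∀ c ∈ row, pvIsTile c) → (∀ c ∈ l, pvIsOD c) →
    fSpec row (l.count "O") (l.count ".")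
      = PySem.List.sorted ((splitAcc l row).headD []) (fun x => x) true
        ++ (splitAcc l row).tail.flatMap (fun s => "#" :: PySem.List.sorted s (fun x => x) true) := by
  induction row with
  | nil =>
    intro l _ hl
    simp [splitAcc, fSpec, sortedOD l hl]
  | cons c r ih =>
    intro l hrow hl
    have hrowr : ∀ x ∈ r, pvIsTile x := fun x hx => hrow x (List.mem_cons_of_mem _ hx)
    rcases hrow c List.mem_cons_self with rfl | rfl | rfl
    · have hl' : ∀ x ∈ l ++ ["."], pvIsOD x := by
        intro x hx
        rcases List.mem_append.mp hx with hx | hx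
        · exact hl x hx
        · simp at hx; subst hx; exact Or.inr rfl
      have := ih (l ++ ["."]) hrowr hl'
      simp only [fSpec, if_pos rfl, splitAcc, if_neg (by decide : ¬("." : String) = "#")]
      simpa [List.count_append] using this
    · have hl' : ∀ x ∈ l ++ ["O"], pvIsOD x := by
        intro x hx
        rcases List.mem_append.mp hx with hx | hx
        · exact hl x hx
        · simp at hx; subst hx; exact Or.inl rfl
      have := ih (l ++ ["O"]) hrowr hl'
      simp only [fSpec, if_neg (by decide : ¬("O" : String) = "."), if_pos rfl, splitAcc,
        if_neg (by decide : ¬("O" : String) = "#")]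
      simpa [List.count_append] using this
    · have := ih [] hrowr (by simp)
      simp only [List.count_nil] at this
      obtain ⟨h, t, hht⟩ : ∃ h t, splitAcc [] r = h :: t := by
        cases hs : splitAcc [] r with
        | nil => exact absurd hs (splitAcc_ne_nil _ _)
        | cons h t => exact ⟨h, t, rfl⟩
      simp only [fSpec, if_neg (by decide : ¬("#" : String) = "."),
        if_neg (by decide : ¬("#" : String) = "O"), if_pos rfl, splitAcc]
      rw [this, hht]
      simp [sortedOD l hl, List.append_assoc]

lemma row_eq (row : List String) (hrow : ∀ c ∈ row, pvIsTile c) :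
    pvShiftRow row = pvShiftRowAlt row := by
  obtain ⟨h, t, hht⟩ : ∃ h t, splitAcc [] row = h :: t := by
    cases hs : splitAcc [] row with
    | nil => exact absurd hs (splitAcc_ne_nil _ _)
    | cons h t => exact ⟨h, t, rfl⟩
  have hmain := mainOD row [] hrow (by simp)
  rw [hht] at hmain
  simp only [List.count_nil, List.headD_cons, List.tail_cons] at hmain
  rw [pvShiftRowAlt, pvSplitOnHash_eq, hht]
  rw [pvShiftRow_eq_fSpec, hmain]
  simp only [List.map_cons, List.headD_cons, List.tail_cons]
  have hfold : ∀ (ts : List (List String)) (a : List String),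
      ts.foldl (fun nr seg => nr ++ ["#"] ++ seg) a = a ++ ts.flatMap (fun s => "#" :: s) := by
    intro ts
    induction ts with
    | nil => intro a; simp
    | cons u us ihu =>
      intro a
      rw [List.foldl_cons, ihu (a ++ ["#"] ++ u), List.flatMap_cons]
      simp [List.append_assoc]
  rw [hfold]
  simp [List.flatMap_map]

-- ---- transpose ----
lemma pvMinLen_map_tail (g : List (List String)) :
    pvMinLen (g.map List.tail) = pvMinLen g - 1 := by
  induction g with
  | nil => simp [pvMinLen]
  | cons r rs ih =>
    cases rs with
    | nil => simp [pvMinLen, List.length_tail]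
    | cons r' rs' =>
      simp only [List.map_cons, pvMinLen, List.length_tail] at ih ⊢
      omega

lemma pvMinLen_pos (g : List (List String)) (hne : g ≠ [])
    (h : ∀ r ∈ g, r ≠ []) : 1 ≤ pvMinLen g := by
  induction g with
  | nil => exact absurd rfl hne
  | cons r rs ih =>
    have hr : r ≠ [] := h r List.mem_cons_self
    have hrlen : 1 ≤ r.length := List.length_pos_iff.mpr hr
    cases rs with
    | nil => simpa [pvMinLen] using hrlen
    | cons r' rs' =>
      have := ih (by simp) (fun x hx => h x (List.mem_cons_of_mem _ hx))
      simp only [pvMinLen]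
      omega

lemma transpose_valid (g : List (List String))
    (hv : ∀ r ∈ g, ∀ c ∈ r.take (pvMinLen g), pvIsTile c) :
    ∀ col ∈ pyTranspose g, ∀ c ∈ col, pvIsTile c := by
  fun_induction pyTranspose g with
  | case1 => simp
  | case2 r rs h ih =>
    have hne : ∀ row ∈ r :: rs, row ≠ [] := by
      intro row hrow
      have := List.all_eq_true.mp h row hrow
      simpa [List.isEmpty_eq_false_iff] using this
    have hpos : 1 ≤ pvMinLen (r :: rs) := pvMinLen_pos _ (by simp) hne
    intro col hcol c hc
    rcases List.mem_cons.mp hcol with rfl | hcol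
    · -- heads column
      obtain ⟨row, hrowmem, hrowc⟩ := List.mem_map.mp hc
      obtain ⟨x, xs, rfl⟩ : ∃ x xs, row = x :: xs := by
        cases row with
        | nil => exact absurd rfl (hne _ hrowmem)
        | cons x xs => exact ⟨x, xs, rfl⟩
      have : c ∈ (x :: xs).take (pvMinLen (r :: rs)) := by
        obtain ⟨m, hm⟩ : ∃ m, pvMinLen (r :: rs) = m + 1 :=
          ⟨pvMinLen (r :: rs) - 1, by omega⟩
        rw [hm, List.take_succ_cons]
        simp [← hrowc]
      exact hv _ hrowmem c this
    · -- recursive columns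
      refine ih ?_ col hcol c hc
      intro r' hr' c' hc'
      obtain ⟨row, hrowmem, rfl⟩ := List.mem_map.mp hr'
      obtain ⟨x, xs, rfl⟩ : ∃ x xs, row = x :: xs := by
        cases row with
        | nil => exact absurd rfl (hne _ hrowmem)
        | cons x xs => exact ⟨x, xs, rfl⟩
      refine hv _ hrowmem c' ?_
      rw [pvMinLen_map_tail] at hc'
      obtain ⟨m, hm⟩ : ∃ m, pvMinLen (r :: rs) = m + 1 :=
        ⟨pvMinLen (r :: rs) - 1, by omega⟩
      rw [hm, List.take_succ_cons]
      rw [hm] at hc'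
      simp only [List.tail_cons, Nat.add_sub_cancel] at hc'
      exact List.mem_cons_of_mem _ hc'
  | case3 => simp

-- ===== VERDICT (by name: the statement is the Claim_ definition above) =====
theorem shift_north_spec : Claim_equal_shift_north := by
  intro grid _ hpre
  unfold Spec_shift_north shift_north shift_north_alt
  rw [PySem.List.foldl_append_singleton_eq_map, List.nil_append]
  have hcols := transpose_valid grid hpre
  have : (pyTranspose grid).map pvShiftRow = (pyTranspose grid).map pvShiftRowAlt :=
    List.map_congr_left (fun col hcol => row_eq col (hcols col hcol))
  rw [this]
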